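-- pv_equiv track=rewrite | github.com/MadSkittles/leetcode | others/delete_nums.py | f
-- ===== SOURCE A (Python) =====
-- def f(nums, n):
--     k = 1
--     for _ in range(32):
--         if not k & n:
--             nums = [*filter(lambda x: not x & k, nums)]
--         k <<= 1
--     min_num, res, k = float('inf'), [], 1
--     for _ in range(32):
--         if k & n:
--             tmp = [*filter(lambda x: x & k, nums)]
--             if len(tmp) < min_num:
--                 min_num = len(tmp)
--                 res = tmp
--         k <<= 1
--     return res
-- ===== SOURCE B (Python) =====
-- def f(nums, n):
--     # one pass builds a bit -> bucket index instead of 32 filter passes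
--     mask = 0xFFFFFFFF & ~n
--     filtered = [x for x in nums if x & mask == 0]
--     pairs = [(k, x) for x in filtered for k in range(32)
--              if x & (1 << k) and n & (1 << k)]
--     groups = {}
--     for k, x in pairs:
--         groups.setdefault(k, []).append(x)
--     res = None
--     for k in range(32):
--         if n & (1 << k):
--             g = groups.get(k, [])
--             if res is None or len(g) < len(res):
--                 res = g
--     return res if res is not None else []
-- ===== Notes on version B (the rewrite author's own statement) =====
-- stated objective: faster
-- what changed: A rescans nums once per bit (32 sequential list-rebuilding filter passes to drop non-submasks, then 32 more filter passes to pick the smallest per-bit group); B filters once with the combined mask 0xFFFFFFFF & ~n and makes ONE pass over the kept elements scattering each into a bit->bucket dictionary, then picks the smallest bucket among n's set bits.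
import Mathlib
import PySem

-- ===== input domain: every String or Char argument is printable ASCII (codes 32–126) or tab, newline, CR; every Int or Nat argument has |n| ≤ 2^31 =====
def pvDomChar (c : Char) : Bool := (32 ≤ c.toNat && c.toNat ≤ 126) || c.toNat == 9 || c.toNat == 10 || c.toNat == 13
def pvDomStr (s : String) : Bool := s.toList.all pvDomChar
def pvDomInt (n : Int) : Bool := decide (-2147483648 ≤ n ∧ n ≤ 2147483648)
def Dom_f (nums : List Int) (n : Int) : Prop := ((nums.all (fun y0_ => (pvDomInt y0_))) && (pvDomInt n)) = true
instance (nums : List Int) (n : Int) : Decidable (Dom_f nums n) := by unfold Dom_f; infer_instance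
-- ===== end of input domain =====

-- B replaces A's 32 filter passes over nums by ONE mask filter plus ONE pass that scatters each
-- kept element into a bit->bucket dictionary, then picks the smallest bucket among n's set bits.

-- ===== PORT A =====
-- state of the first loop: (nums, k); state of the second: ((min_num, res), k),
-- with min_num : Option Int, none playing float('inf')
def fStep1 (n : Int) (p : List Int × Int) (_ : Nat) : List Int × Int :=
  ((if PySem.Int.band p.2 n = 0 then p.1.filter (fun x => PySem.Int.band x p.2 = 0) else p.1),
    p.2 <<< (1 : Nat))

def fStep2 (n : Int) (nums1 : List Int) (p : (Option Int × List Int) × Int) (_ : Nat) :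
    (Option Int × List Int) × Int :=
  if PySem.Int.band p.2 n ≠ 0 then
    let tmp := nums1.filter (fun x => PySem.Int.band x p.2 ≠ 0)
    if (match p.1.1 with | none => true | some m => decide ((tmp.length : Int) < m)) = true then
      ((some (tmp.length : Int), tmp), p.2 <<< (1 : Nat))
    else (p.1, p.2 <<< (1 : Nat))
  else (p.1, p.2 <<< (1 : Nat))

def f (nums : List Int) (n : Int) : List Int :=
  let s1 := (List.range 32).foldl (fStep1 n) (nums, 1)
  let s2 := (List.range 32).foldl (fStep2 n s1.1) ((none, []), 1)
  s2.1.2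

-- ===== PORT B =====
-- groups.setdefault(k, []).append(x) is exactly PySem.Dict.modify k [] (· ++ [x])
def fAltMask (n : Int) : Int := PySem.Int.band 0xFFFFFFFF (Int.not n)

def fAltBits (n x : Int) (k : Nat) : Bool :=
  decide (PySem.Int.band x ((1 : Int) <<< k) ≠ 0 ∧ PySem.Int.band n ((1 : Int) <<< k) ≠ 0)

def fAltSel (n : Int) (groups : PySem.Dict Int (List Int)) (res : Option (List Int)) (k : Nat) :
    Option (List Int) :=
  if PySem.Int.band n ((1 : Int) <<< k) ≠ 0 then
    let g := groups.getD (k : Int) []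
    match res with
    | none => some g
    | some r => if g.length < r.length then some g else res
  else res

def f_alt (nums : List Int) (n : Int) : List Int :=
  let filtered := nums.filter (fun x => PySem.Int.band x (fAltMask n) = 0)
  let pairs := filtered.flatMap (fun x =>
    ((List.range 32).filter (fAltBits n x)).map (fun k : Nat => ((k : Int), x)))
  let groups := pairs.foldl (fun d p => d.modify p.1 [] (· ++ [p.2])) PySem.Dict.empty
  ((List.range 32).foldl (fAltSel n groups) none).getD []

-- ===== PRECONDITION & SPEC =====
def Spec_f (nums : List Int) (n : Int) (out : List Int) : Prop := out = f_alt nums n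
instance (nums : List Int) (n : Int) (out : List Int) : Decidable (Spec_f nums n out) := by unfold Spec_f; infer_instance

-- ===== CLAIM (what is proved, stated in full; the proofs are below) =====
def Claim_equal_f : Prop := ∀ (nums : List Int) (n : Int), Dom_f nums n → Spec_f nums n (f nums n)

-- ===== LEMMAS AND PROOFS =====

theorem pvNatSubLand (m n : Nat) : m - (m &&& n) = Nat.ldiff m n := by
  induction m using Nat.binaryRec generalizing n with
  | zero => simp [Nat.ldiff]
  | bit a m ih =>
    conv_lhs => rw [← Nat.bit_testBit_zero_shiftRight_one n]
    conv_rhs => rw [← Nat.bit_testBit_zero_shiftRight_one n]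
    rw [Nat.land_bit, Nat.ldiff_bit]
    have h := ih (n >>> 1)
    have hle : m &&& n >>> 1 ≤ m := Nat.and_le_left
    cases a <;> cases hb : n.testBit 0 <;> simp [Nat.bit_val] <;> omega

theorem pvBandEqLand (a b : Int) : PySem.Int.band a b = Int.land a b := by
  unfold PySem.Int.band
  cases a with
  | ofNat m =>
    cases b with
    | ofNat n => simp only [Int.land]; norm_num
    | negSucc n =>
      have h0 : ¬ (0 : Int) ≤ Int.negSucc n := by omega
      simp [Int.land, h0, pvNatSubLand]
  | negSucc m =>
    have h0 : ¬ (0 : Int) ≤ Int.negSucc m := by omega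
    cases b with
    | ofNat n =>
      simp [Int.land, h0, pvNatSubLand]
    | negSucc n =>
      have h1 : ¬ (0 : Int) ≤ Int.negSucc n := by omega
      simp [Int.land, h0, h1]
      omega

theorem pvTbBand (a b : Int) (k : Nat) :
    (PySem.Int.band a b).testBit k = (a.testBit k && b.testBit k) := by
  rw [pvBandEqLand, Int.testBit_land]

theorem pvNotEqLnot (n : Int) : Int.not n = Int.lnot n := by
  cases n <;> simp [Int.not, Int.lnot]

theorem pvEqZeroIff {a : Int} (h : 0 ≤ a) : a = 0 ↔ ∀ k, a.testBit k = false := by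
  cases a with
  | ofNat m =>
    constructor
    · intro h' k; rw [h']; exact Nat.zero_testBit k
    · intro hk
      have : m = 0 := Nat.eq_of_testBit_eq (fun i => by simpa using hk i)
      simp [this]
  | negSucc m => constructor <;> intro h' <;> simp_all

theorem pvTbPow (i k : Nat) : ((2 ^ i : Int)).testBit k = decide (i = k) := by
  have : ((2 ^ i : Int)) = ((2 ^ i : Nat) : Int) := by push_cast; ring
  rw [this]
  show Nat.testBit (2 ^ i) k = decide (i = k)
  exact Nat.testBit_two_pow

theorem pvBandPowNonneg (x : Int) (i : Nat) : 0 ≤ PySem.Int.band x (2 ^ i) := by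
  rw [PySem.Int.band_comm]
  exact PySem.Int.band_nonneg_of_nonneg_left x (by positivity)

theorem pvBandPowEqZero (x : Int) (i : Nat) :
    (PySem.Int.band x (2 ^ i) = 0) ↔ x.testBit i = false := by
  rw [pvEqZeroIff (pvBandPowNonneg x i)]
  constructor
  · intro h
    have := h i
    rw [pvTbBand, pvTbPow] at this
    simpa using this
  · intro h k
    rw [pvTbBand, pvTbPow]
    by_cases hik : i = k
    · subst hik; simp [h]
    · simp [hik]

theorem pvOneShl (k : Nat) : (1 : Int) <<< k = 2 ^ k := by
  rw [Int.shiftLeft_eq]; ring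

theorem pvTbMask (n : Int) (k : Nat) :
    (PySem.Int.band 0xFFFFFFFF (Int.not n)).testBit k = (decide (k < 32) && !n.testBit k) := by
  rw [pvTbBand, pvNotEqLnot, Int.testBit_lnot]
  have h1 : (0xFFFFFFFF : Int).testBit k = decide (k < 32) := by
    show Nat.testBit 0xFFFFFFFF k = decide (k < 32)
    have : (0xFFFFFFFF : Nat) = 2 ^ 32 - 1 := by norm_num
    rw [this, Nat.testBit_two_pow_sub_one]
  rw [h1]

theorem pvMaskNonneg (n : Int) : 0 ≤ PySem.Int.band 0xFFFFFFFF (Int.not n) := by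
  exact PySem.Int.band_nonneg_of_nonneg_left _ (by norm_num)

theorem pvBandMaskEqZero (n x : Int) :
    (PySem.Int.band x (PySem.Int.band 0xFFFFFFFF (Int.not n)) = 0) ↔
      ∀ i < 32, n.testBit i = false → x.testBit i = false := by
  have hnn : 0 ≤ PySem.Int.band x (PySem.Int.band 0xFFFFFFFF (Int.not n)) := by
    rw [PySem.Int.band_comm]
    exact PySem.Int.band_nonneg_of_nonneg_left x (pvMaskNonneg n)
  rw [pvEqZeroIff hnn]
  constructor
  · intro h i hi hni
    have := h i
    rw [pvTbBand, pvTbMask, hni] at this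
    simpa [hi] using this
  · intro h k
    rw [pvTbBand, pvTbMask]
    by_cases hk : k < 32
    · by_cases hnk : n.testBit k = false
      · simp [h k hk hnk]
      · revert hnk; cases n.testBit k <;> simp
    · simp [hk]

theorem pvPhase1 (nums : List Int) (n : Int) (m : Nat) :
    (List.range m).foldl (fStep1 n) (nums, 1) =
      (nums.filter (fun x => decide (∀ i < m, n.testBit i = false → x.testBit i = false)), 2 ^ m) := by
  induction m with
  | zero =>
    simp only [List.range_zero, List.foldl_nil, pow_zero]
    refine Prod.ext ?_ rfl
    show nums = _
    symm
    apply (List.filter_eq_self).mpr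
    intro x _
    simp
  | succ m ih =>
    rw [List.range_succ, List.foldl_append, ih]
    simp only [List.foldl_cons, List.foldl_nil]
    unfold fStep1
    have hk2 : ((2 ^ m : Int)) <<< (1 : Nat) = 2 ^ (m + 1) := by
      rw [Int.shiftLeft_eq]; ring
    have hcond : (PySem.Int.band (2 ^ m : Int) n = 0) ↔ n.testBit m = false := by
      rw [PySem.Int.band_comm]; exact pvBandPowEqZero n m
    by_cases hb : n.testBit m = false
    · rw [if_pos (hcond.mpr hb)]
      simp only [hk2]
      rw [List.filter_filter]
      congr 1
      apply List.filter_congr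
      intro x _
      rw [← Bool.decide_and, decide_eq_decide, pvBandPowEqZero]
      constructor
      · rintro ⟨h2, h1⟩ i hi hni
        rcases Nat.lt_succ_iff_lt_or_eq.mp hi with hi' | rfl
        · exact h1 i hi' hni
        · exact h2
      · intro h
        exact ⟨h m (Nat.lt_succ_self m) hb, fun i hi hni => h i (Nat.lt_succ_of_lt hi) hni⟩
    · rw [if_neg (fun hc => hb (hcond.mp hc))]
      simp only [hk2]
      congr 1
      apply List.filter_congr
      intro x _
      rw [decide_eq_decide]
      constructor
      · intro h i hi hni
        rcases Nat.lt_succ_iff_lt_or_eq.mp hi with hi' | rfl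
        · exact h i hi' hni
        · exact absurd hni hb
      · intro h i hi hni
        exact h i (Nat.lt_succ_of_lt hi) hni

theorem pvNums1 (nums : List Int) (n : Int) :
    ((List.range 32).foldl (fStep1 n) (nums, 1)).1 =
      nums.filter (fun x => PySem.Int.band x (fAltMask n) = 0) := by
  rw [pvPhase1]
  apply List.filter_congr
  intro x _
  rw [decide_eq_decide]
  unfold fAltMask
  exact (pvBandMaskEqZero n x).symm

theorem pvFlatMapIte {α : Type} (c : α → Bool) (l : List α) :
    (l.flatMap (fun x => if c x then [x] else [])) = l.filter c := by
  induction l with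
  | nil => rfl
  | cons a l ih =>
    by_cases h : c a <;> simp [List.flatMap_cons, h, ih]

theorem pvMapFilterPairs (x : Int) (k : Nat) (js : List Nat) :
    List.map (fun p : Int × Int => p.2)
      (List.filter (fun p : Int × Int => p.1 == (k : Int)) (js.map (fun j : Nat => ((j : Int), x)))) =
    List.replicate (js.count k) x := by
  induction js with
  | nil => rfl
  | cons j js ih =>
    simp only [List.count_cons]
    by_cases h : j = k
    · subst h
      simp [ih, List.replicate_succ]
    · have hb : (((j : Int), x).1 == (k : Int)) = false := by simp [h]
      simp [hb, ih, h]

theorem pvCountFilter (l : List Nat) (q : Nat → Bool) (k : Nat) :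
    (l.filter q).count k = if q k then l.count k else 0 := by
  induction l with
  | nil => simp
  | cons a l ih =>
    rw [List.filter_cons]
    by_cases ha : q a
    · simp only [ha, if_pos, List.count_cons, ih]
      by_cases hak : a = k
      · subst hak; simp [ha]
      · simp [hak]
    · have : q a = false := by simpa using ha
      simp only [this, Bool.false_eq_true, if_false, ih, List.count_cons]
      by_cases hak : a = k
      · subst hak; simp [this]
      · simp [hak]

theorem pvGroups (n : Int) (filtered : List Int) (k : Nat) (hk : k < 32) :
    ((filtered.flatMap (fun x =>
        ((List.range 32).filter (fAltBits n x)).map (fun j : Nat => ((j : Int), x)))).foldl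
      (fun d p => d.modify p.1 [] (· ++ [p.2])) PySem.Dict.empty).getD (k : Int) [] =
      filtered.filter (fun x => fAltBits n x k) := by
  rw [PySem.Dict.getD_foldl_modify_append, PySem.Dict.getD_empty, List.nil_append]
  rw [List.filter_flatMap, List.map_flatMap]
  have hstep : ∀ x ∈ filtered,
      List.map (fun p : Int × Int => p.2)
        (List.filter (fun p : Int × Int => p.1 == (k : Int))
          (((List.range 32).filter (fAltBits n x)).map (fun j : Nat => ((j : Int), x)))) =
      if fAltBits n x k then [x] else [] := by
    intro x _
    rw [pvMapFilterPairs, pvCountFilter]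
    have h1 : (List.range 32).count k = 1 :=
      List.count_eq_one_of_mem List.nodup_range (List.mem_range.mpr hk)
    rw [h1]
    by_cases h : fAltBits n x k <;> simp [h]
  rw [List.flatMap_congr hstep]
  exact pvFlatMapIte _ filtered

theorem pvSel (n : Int) (L : List Int) (groups : PySem.Dict Int (List Int))
    (hg : ∀ k : Nat, k < 32 → groups.getD ((k : Int)) [] = L.filter (fun x => fAltBits n x k)) :
    ∀ m, m ≤ 32 →
      ((List.range m).foldl (fStep2 n L) ((none, []), 1)).2 = 2 ^ m ∧
      ((List.range m).foldl (fStep2 n L) ((none, []), 1)).1.1 =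
        ((List.range m).foldl (fAltSel n groups) none).map (fun g => (g.length : Int)) ∧
      ((List.range m).foldl (fStep2 n L) ((none, []), 1)).1.2 =
        ((List.range m).foldl (fAltSel n groups) none).getD [] := by
  intro m
  induction m with
  | zero => intro _; simp
  | succ m ih =>
    intro hm
    obtain ⟨hk, h1, h2⟩ := ih (by omega)
    simp only [List.range_succ, List.foldl_append, List.foldl_cons, List.foldl_nil]
    set a := (List.range m).foldl (fStep2 n L) ((none, []), 1) with ha
    set b := (List.range m).foldl (fAltSel n groups) none with hb
    have hshl : ((1 : Int) <<< m) = 2 ^ m := pvOneShl m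
    have hk2 : a.2 <<< (1 : Nat) = 2 ^ (m + 1) := by
      rw [hk, Int.shiftLeft_eq]; ring
    unfold fStep2 fAltSel
    have hcond : (PySem.Int.band a.2 n ≠ 0) ↔ (PySem.Int.band n ((1 : Int) <<< m) ≠ 0) := by
      rw [hk, hshl, PySem.Int.band_comm]
    by_cases hc : PySem.Int.band n ((1 : Int) <<< m) ≠ 0
    · rw [if_pos (hcond.mpr hc), if_pos hc]
      have hm32 : m < 32 := by omega
      have hg' : groups.getD (m : Int) [] = L.filter (fun x => PySem.Int.band x a.2 ≠ 0) := by
        rw [hg m hm32, hk]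
        apply List.filter_congr
        intro x _
        unfold fAltBits
        have hc2 : PySem.Int.band n (2 ^ m) ≠ 0 := by rw [← hshl]; exact hc
        rw [hshl]
        simp [hc2]
      cases hbv : b with
      | none =>
        rw [hbv] at h1 h2
        simp only [Option.map_none] at h1
        rw [if_pos (by rw [h1])]
        refine ⟨hk2, ?_, ?_⟩ <;> simp [hg']
      | some r =>
        rw [hbv] at h1 h2
        simp only [Option.map_some] at h1
        simp only [Option.getD_some] at h2
        rw [h1, hg']
        by_cases hlt : (L.filter (fun x => !decide (PySem.Int.band x a.2 = 0))).length < r.length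
        · simp [hlt, hk2]
        · simp [hlt, hk2, h2, h1]
    · rw [if_neg (fun h => hc (hcond.mp h)), if_neg hc]
      exact ⟨hk2, h1, h2⟩

theorem pvMain (nums : List Int) (n : Int) : f nums n = f_alt nums n := by
  simp only [f, f_alt]
  rw [pvNums1]
  set L := nums.filter (fun x => decide (PySem.Int.band x (fAltMask n) = 0)) with hL
  set groups := (L.flatMap (fun x =>
      ((List.range 32).filter (fAltBits n x)).map (fun j : Nat => ((j : Int), x)))).foldl
    (fun d p => d.modify p.1 [] (· ++ [p.2])) PySem.Dict.empty with hG
  obtain ⟨-, -, h2⟩ := pvSel n L groups (fun k hk => pvGroups n L k hk) 32 le_rfl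
  exact h2

-- ===== VERDICT (by name: the statement is the Claim_ definition above) =====
theorem f_spec : Claim_equal_f := by
  intro nums n _
  unfold Spec_f
  exact pvMain nums n
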